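-- pv_equiv track=rewrite | github.com/jvdsn/crypto-attacks | attacks/factorization/branch_and_prune.py | _branch_and_prune_pq
-- ===== SOURCE A (Python) =====
-- from itertools import product
--
-- def _branch_and_prune_pq(N, p, q, p_, q_, i):
--     if i == len(p) or i == len(q):
--         yield p_, q_
--     else:
--         c1 = ((N - p_ * q_) >> i) & 1
--         p_prev = p[i]
--         q_prev = q[i]
--         p_possible = [0, 1] if p_prev is None else [p_prev]
--         q_possible = [0, 1] if q_prev is None else [q_prev]
--         for p_bit, q_bit in product(p_possible, q_possible):
--             # Addition modulo 2 is just xor.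
--             if p_bit ^ q_bit == c1:
--                 p[i] = p_bit
--                 q[i] = q_bit
--                 yield from _branch_and_prune_pq(N, p, q, p_ | (p_bit << i), q_ | (q_bit << i), i + 1)
--
--         p[i] = p_prev
--         q[i] = q_prev
-- ===== SOURCE B (Python) =====
-- def _branch_and_prune_pq(N, p, q, p_, q_, i):
--     if i == len(p) or i == len(q):
--         yield p_, q_
--         return
--     # Iterative frontier expansion: all solutions sit at depth min(len(p),len(q)),
--     # so the leaves appear in the same (lexicographic) order as A's DFS yields them.
--     # Each state carries the residual r = N - pc*qc, updated incrementally per bit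
--     # (a shift when the delta is the single bit 2**k) instead of remultiplying pc*qc.
--     m = min(len(p), len(q))
--     states = [(p_, q_, N - p_ * q_)]
--     for k in range(i, m):
--         pk = p[k]
--         qk = q[k]
--         p_possible = [0, 1] if pk is None else [pk]
--         q_possible = [0, 1] if qk is None else [qk]
--         bit = 1 << k
--         next_states = []
--         for pc, qc, r in states:
--             c1 = (r >> k) & 1
--             for pb in p_possible:
--                 for qb in q_possible:
--                     if pb ^ qb == c1:
--                         pn = pc | (pb << k)
--                         qn = qc | (qb << k)
--                         dp = pn - pc
--                         dq = qn - qc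
--                         if dq:
--                             r_ = r - (pn << k) if dq == bit else r - pn * dq
--                         else:
--                             r_ = r
--                         if dp:
--                             r_ = r_ - (qc << k) if dp == bit else r_ - qc * dp
--                         next_states.append((pn, qn, r_))
--         states = next_states
--         if not states:
--             break
--     for pc, qc, _ in states:
--         yield pc, qc
-- ===== Notes on version B (the rewrite author's own statement) =====
-- stated objective: alternative
-- what changed: Replaces A's recursive generator (which mutates p/q in place and recomputes the full big-int product N - p_*q_ at every search node) by an iterative level-by-level frontier expansion that never mutates its arguments, carries the residual N - p_*q_ in each state and updates it per added bit with shifts/one small multiply, and stops early once the frontier is pruned empty.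
import Mathlib
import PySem

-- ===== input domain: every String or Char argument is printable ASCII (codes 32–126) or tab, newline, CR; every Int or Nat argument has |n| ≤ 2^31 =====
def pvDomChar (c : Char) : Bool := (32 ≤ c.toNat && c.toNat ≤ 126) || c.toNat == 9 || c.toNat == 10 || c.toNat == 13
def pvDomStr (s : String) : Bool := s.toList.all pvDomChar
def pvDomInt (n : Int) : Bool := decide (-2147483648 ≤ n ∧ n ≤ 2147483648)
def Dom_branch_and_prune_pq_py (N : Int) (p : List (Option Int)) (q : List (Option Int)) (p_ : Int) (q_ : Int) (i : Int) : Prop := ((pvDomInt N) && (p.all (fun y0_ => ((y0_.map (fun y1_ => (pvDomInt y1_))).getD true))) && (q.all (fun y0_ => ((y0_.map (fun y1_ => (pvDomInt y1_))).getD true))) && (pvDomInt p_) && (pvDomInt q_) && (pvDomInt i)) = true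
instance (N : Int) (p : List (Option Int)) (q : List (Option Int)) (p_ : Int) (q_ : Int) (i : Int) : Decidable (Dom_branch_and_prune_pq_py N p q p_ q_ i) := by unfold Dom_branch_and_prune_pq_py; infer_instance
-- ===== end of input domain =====

-- B replaces A's recursive DFS with mutation and a full N - p_*q_ remultiply per node by an
-- iterative level-by-level frontier expansion carrying the residual N - p_*q_ incrementally
-- (objective: alternative algorithm; A temporarily mutates p/q but restores them, B never mutates).

-- ===== PORT A =====
-- A's generator recursion; p[i]/q[i] mutation is passed along via List.set exactly as Python does
-- (the `else []` branch is the IndexError region, excluded by Pre_).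
def bapA_rec (N : Int) (p : List (Option Int)) (q : List (Option Int)) (p_ : Int) (q_ : Int) (k : Nat) : List (Int × Int) :=
  if k = p.length ∨ k = q.length then [(p_, q_)]
  else if h : k < p.length ∧ k < q.length then
    let c1 : Int := PySem.Int.band ((N - p_ * q_) >>> k) 1
    let p_possible : List Int := match p.getD k none with | none => [0, 1] | some b => [b]
    let q_possible : List Int := match q.getD k none with | none => [0, 1] | some b => [b]
    p_possible.flatMap (fun p_bit =>
      q_possible.flatMap (fun q_bit =>
        if PySem.Int.bxor p_bit q_bit = c1 then
          bapA_rec N (p.set k (some p_bit)) (q.set k (some q_bit))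
            (PySem.Int.bor p_ (p_bit <<< k)) (PySem.Int.bor q_ (q_bit <<< k)) (k + 1)
        else []))
  else []
termination_by p.length - k
decreasing_by simp_all; omega

def branch_and_prune_pq_py (N : Int) (p : List (Option Int)) (q : List (Option Int)) (p_ : Int) (q_ : Int) (i : Int) : List (Int × Int) :=
  if i < 0 then []  -- ValueError (negative shift) region, excluded by Pre_
  else bapA_rec N p q p_ q_ i.toNat

-- ===== PORT B =====
-- one level of Source B's frontier expansion (the nested for-loops appending to next_states)
def bapB_step (p : List (Option Int)) (q : List (Option Int)) (k : Nat) (states : List (Int × Int × Int)) : List (Int × Int × Int) :=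
  let p_possible : List Int := match p.getD k none with | none => [0, 1] | some b => [b]
  let q_possible : List Int := match q.getD k none with | none => [0, 1] | some b => [b]
  states.flatMap (fun s =>
    let pc : Int := s.1
    let qc : Int := s.2.1
    let r : Int := s.2.2
    let c1 : Int := PySem.Int.band (r >>> k) 1
    p_possible.flatMap (fun pb =>
      q_possible.flatMap (fun qb =>
        if PySem.Int.bxor pb qb = c1 then
          let pn := PySem.Int.bor pc (pb <<< k)
          let qn := PySem.Int.bor qc (qb <<< k)
          let dp := pn - pc
          let dq := qn - qc
          let r1 := if dq ≠ 0 then (if dq = (1 : Int) <<< k then r - (pn <<< k) else r - pn * dq) else r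
          let r2 := if dp ≠ 0 then (if dp = (1 : Int) <<< k then r1 - (qc <<< k) else r1 - qc * dp) else r1
          [(pn, qn, r2)]
        else [])))

-- the `for k in range(i, m)` loop: n = number of remaining levels, k = current level
def bapB_loop (p : List (Option Int)) (q : List (Option Int)) (n : Nat) (k : Nat) (states : List (Int × Int × Int)) : List (Int × Int × Int) :=
  match n with
  | 0 => states
  | n + 1 =>
    let next := bapB_step p q k states
    if next.isEmpty then [] else bapB_loop p q n (k + 1) next

def branch_and_prune_pq_py_alt (N : Int) (p : List (Option Int)) (q : List (Option Int)) (p_ : Int) (q_ : Int) (i : Int) : List (Int × Int) :=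
  if i = (p.length : Int) ∨ i = (q.length : Int) then [(p_, q_)]
  else
    let m := min p.length q.length
    (bapB_loop p q (m - i.toNat) i.toNat [(p_, q_, N - p_ * q_)]).map (fun s => (s.1, s.2.1))

-- ===== PRECONDITION & SPEC =====
-- Pre_ excludes exactly the inputs where A raises: i < 0 (ValueError on a negative shift) and
-- i past the end of either list without equalling a length (IndexError).
def Pre_branch_and_prune_pq_py (N : Int) (p : List (Option Int)) (q : List (Option Int)) (p_ : Int) (q_ : Int) (i : Int) : Prop :=
  0 ≤ i ∧ (i = (p.length : Int) ∨ i = (q.length : Int) ∨ (i ≤ (p.length : Int) ∧ i ≤ (q.length : Int)))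
instance (N : Int) (p : List (Option Int)) (q : List (Option Int)) (p_ : Int) (q_ : Int) (i : Int) : Decidable (Pre_branch_and_prune_pq_py N p q p_ q_ i) := by unfold Pre_branch_and_prune_pq_py; infer_instance

def pvWitness_branch_and_prune_pq_py : Int × List (Option Int) × List (Option Int) × Int × Int × Int :=
  (35, [some 1, none, some 1], [none, some 1, none], 0, 0, 0)

def Spec_branch_and_prune_pq_py (N : Int) (p : List (Option Int)) (q : List (Option Int)) (p_ : Int) (q_ : Int) (i : Int) (out : List (Int × Int)) : Prop := out = branch_and_prune_pq_py_alt N p q p_ q_ i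
instance (N : Int) (p : List (Option Int)) (q : List (Option Int)) (p_ : Int) (q_ : Int) (i : Int) (out : List (Int × Int)) : Decidable (Spec_branch_and_prune_pq_py N p q p_ q_ i out) := by unfold Spec_branch_and_prune_pq_py; infer_instance

-- ===== CLAIM (what is proved, stated in full; the proofs are below) =====
def Claim_equal_branch_and_prune_pq_py : Prop := ∀ (N : Int) (p : List (Option Int)) (q : List (Option Int)) (p_ : Int) (q_ : Int) (i : Int), Dom_branch_and_prune_pq_py N p q p_ q_ i → Pre_branch_and_prune_pq_py N p q p_ q_ i → Spec_branch_and_prune_pq_py N p q p_ q_ i (branch_and_prune_pq_py N p q p_ q_ i)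

-- ===== LEMMAS AND PROOFS =====

-- A's recursion reads p/q only at indices ≥ k, so the List.set mutation at index k is invisible
-- to the recursive call at k+1.
theorem bapA_rec_congr (N : Int) (p p' q q' : List (Option Int)) (p_ q_ : Int) (k : Nat)
    (hp : p'.length = p.length) (hq : q'.length = q.length)
    (hpe : ∀ j, k ≤ j → p'.getD j none = p.getD j none)
    (hqe : ∀ j, k ≤ j → q'.getD j none = q.getD j none) :
    bapA_rec N p' q' p_ q_ k = bapA_rec N p q p_ q_ k := by
  rw [bapA_rec, bapA_rec, hp, hq, hpe k le_rfl, hqe k le_rfl]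
  split_ifs with h1 h2
  · rfl
  · dsimp only
    congr 1
    funext p_bit
    congr 1
    funext q_bit
    split
    · exact bapA_rec_congr N (p.set k (some p_bit)) (p'.set k (some p_bit))
        (q.set k (some q_bit)) (q'.set k (some q_bit)) _ _ (k + 1)
        (by simp [hp]) (by simp [hq])
        (fun j hj => by
          simp only [List.getD_eq_getElem?_getD, List.getElem?_set_ne (by omega : k ≠ j)]
          simpa [List.getD_eq_getElem?_getD] using hpe j (by omega))
        (fun j hj => by
          simp only [List.getD_eq_getElem?_getD, List.getElem?_set_ne (by omega : k ≠ j)]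
          simpa [List.getD_eq_getElem?_getD] using hqe j (by omega))
    · rfl
  · rfl
termination_by p.length - k
decreasing_by simp; omega

-- the List.set mutation at index k is invisible at level k+1
theorem bapA_rec_set (N : Int) (p q : List (Option Int)) (a b : Option Int) (x y : Int) (k : Nat) :
    bapA_rec N (p.set k a) (q.set k b) x y (k + 1) = bapA_rec N p q x y (k + 1) :=
  bapA_rec_congr N p (p.set k a) q (q.set k b) x y (k + 1) (by simp) (by simp)
    (fun j hj => by
      simp only [List.getD_eq_getElem?_getD, List.getElem?_set_ne (by omega : k ≠ j)])
    (fun j hj => by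
      simp only [List.getD_eq_getElem?_getD, List.getElem?_set_ne (by omega : k ≠ j)])

-- one A-node expands to the flatMap of its children (one state's worth of bapB_step)
theorem bapA_node (N : Int) (p q : List (Option Int)) (k : Nat)
    (hk : k < p.length ∧ k < q.length) (pc qc r : Int) (hr : r = N - pc * qc) :
    bapA_rec N p q pc qc k
      = (bapB_step p q k [(pc, qc, r)]).flatMap (fun s => bapA_rec N p q s.1 s.2.1 (k + 1)) := by
  subst hr
  rw [bapA_rec, if_neg (by omega), dif_pos hk]
  simp only [bapB_step, List.flatMap_cons, List.flatMap_nil, List.append_nil,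
    List.flatMap_assoc]
  congr 1
  funext pb
  congr 1
  funext qb
  split
  · simp [bapA_rec_set]
  · simp

-- one A-node expands to the flatMap of its children; with the residual invariant this is bapB_step
theorem bapA_rec_step (N : Int) (p q : List (Option Int)) (k : Nat)
    (hk : k < p.length ∧ k < q.length) (S : List (Int × Int × Int))
    (hinv : ∀ s ∈ S, s.2.2 = N - s.1 * s.2.1) :
    S.flatMap (fun s => bapA_rec N p q s.1 s.2.1 k)
      = (bapB_step p q k S).flatMap (fun s => bapA_rec N p q s.1 s.2.1 (k + 1)) := by
  induction S with
  | nil => simp [bapB_step]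
  | cons s S ih =>
    have hs : bapB_step p q k (s :: S) = bapB_step p q k [s] ++ bapB_step p q k S := by
      simp [bapB_step]
    rw [List.flatMap_cons, hs, List.flatMap_append,
      ih (fun t ht => hinv t (List.mem_cons_of_mem s ht)),
      bapA_node N p q k hk s.1 s.2.1 s.2.2 (hinv s (List.mem_cons_self ..))]

theorem bapB_step_inv (N : Int) (p q : List (Option Int)) (k : Nat) (S : List (Int × Int × Int))
    (hinv : ∀ s ∈ S, s.2.2 = N - s.1 * s.2.1) :
    ∀ s ∈ bapB_step p q k S, s.2.2 = N - s.1 * s.2.1 := by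
  intro s hs
  simp only [bapB_step, List.mem_flatMap] at hs
  obtain ⟨t, htS, hs⟩ := hs
  obtain ⟨pb, -, qb, -, hs⟩ := hs
  split at hs
  · simp only [List.mem_singleton] at hs
    subst hs
    have hr := hinv t htS
    dsimp only
    have step1 : ∀ (r x d : Int),
        (if d ≠ 0 then (if d = (1 : Int) <<< k then r - (x <<< k) else r - x * d) else r)
          = r - x * d := by
      intro r x d
      by_cases h0 : d = 0
      · simp [h0]
      · rw [if_pos h0]
        split_ifs with h
        · rw [h, Int.shiftLeft_eq, Int.shiftLeft_eq, one_mul]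
        · rfl
    rw [step1, step1, hr]
    ring
  · simp at hs

theorem bapB_loop_eq (N : Int) (p q : List (Option Int)) (n k : Nat)
    (hnk : k + n = min p.length q.length) (S : List (Int × Int × Int))
    (hinv : ∀ s ∈ S, s.2.2 = N - s.1 * s.2.1) :
    (bapB_loop p q n k S).map (fun s => (s.1, s.2.1))
      = S.flatMap (fun s => bapA_rec N p q s.1 s.2.1 k) := by
  induction n generalizing k S with
  | zero =>
    have hk : k = p.length ∨ k = q.length := by omega
    rw [bapB_loop]
    have : ∀ s : Int × Int × Int, bapA_rec N p q s.1 s.2.1 k = [(s.1, s.2.1)] := by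
      intro s; rw [bapA_rec, if_pos hk]
    simp only [this]
    exact List.map_eq_flatMap
  | succ n ih =>
    rw [bapB_loop]
    rw [bapA_rec_step N p q k ⟨by omega, by omega⟩ S hinv]
    by_cases hE : bapB_step p q k S = []
    · simp [hE]
    · rw [if_neg (by simpa [List.isEmpty_iff] using hE)]
      exact ih (k + 1) (by omega) (bapB_step p q k S) (bapB_step_inv N p q k S hinv)

-- ===== VERDICT (by name: the statement is the Claim_ definition above) =====
theorem branch_and_prune_pq_py_spec : Claim_equal_branch_and_prune_pq_py := by
  intro N p q p_ q_ i _ hpre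
  obtain ⟨hi, hcase⟩ := hpre
  unfold Spec_branch_and_prune_pq_py branch_and_prune_pq_py branch_and_prune_pq_py_alt
  rw [if_neg (by omega)]
  by_cases hb : i = (p.length : Int) ∨ i = (q.length : Int)
  · rw [if_pos hb, bapA_rec, if_pos (by omega)]
  · rw [if_neg hb]
    have hle : i.toNat ≤ min p.length q.length := by omega
    rw [bapB_loop_eq N p q (min p.length q.length - i.toNat) i.toNat (by omega)
      [(p_, q_, N - p_ * q_)]
      (by rintro s hs; simp only [List.mem_singleton] at hs; subst hs; rfl)]
    simp
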